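-- pv_equiv track=rewrite | github.com/tikz/icb-flash-0 | fun.py | quienGano
-- ===== SOURCE A (Python) =====
-- def quienGano(lista):
--     # quienGano recibe una lista con las sumas de cada jugador y devuelve el index del jugador que ganó.
--     # Si no ganó nadie, devuelve None.
--     # Si hay empate entre dos o más jugadores, tambien devuelve None.
--
--     # Primero creo una lista con tuplas que contengan (indexOriginal, suma)
--     l = [(i, x) for i, x in enumerate(lista)]
--
--     # Solo me interesan los que no se pasaron de 21.
--     l = [x for x in l if x[1] <= 21]
--
--     if len(l) == 0:
--         return None  # Se pasaron todos de 21, perdieron todos.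
--     elif len(l) == 1:
--         return l[0][0]  # Hay uno solo que no perdió por pasarse. Ganó ese.
--
--     distancias = [(i, 21 - x) for i, x in l]
--
--     # Ordeno la lista de forma creciente en base a la distancia al 21.
--     distancias.sort(key=lambda x: x[1])
--
--     # El primer jugador de la lista ordenada tiene la misma distancia que el 2do. Hay un empate entre esos dos (o más jugadores).
--     if distancias[0][1] == distancias[1][1]:
--         return None
--     else:
--         return distancias[0][0]
-- ===== SOURCE B (Python) =====
-- def quienGano(lista):
--     # One pass: keep the best (index, distance) seen so far and a tie flag.
--     best = None
--     tied = False
--     for i, v in enumerate(lista):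
--         if v <= 21:
--             d = 21 - v
--             if best is None or d < best[1]:
--                 best = (i, d)
--                 tied = False
--             elif d == best[1]:
--                 tied = True
--     if best is None or tied:
--         return None
--     return best[0]
-- ===== Notes on version B (the rewrite author's own statement) =====
-- stated objective: faster
-- what changed: Replaces A's build-tuples/filter/sort/compare-first-two pipeline with a single enumerate pass keeping a running (index, distance) minimum and a tie flag.
import Mathlib
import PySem

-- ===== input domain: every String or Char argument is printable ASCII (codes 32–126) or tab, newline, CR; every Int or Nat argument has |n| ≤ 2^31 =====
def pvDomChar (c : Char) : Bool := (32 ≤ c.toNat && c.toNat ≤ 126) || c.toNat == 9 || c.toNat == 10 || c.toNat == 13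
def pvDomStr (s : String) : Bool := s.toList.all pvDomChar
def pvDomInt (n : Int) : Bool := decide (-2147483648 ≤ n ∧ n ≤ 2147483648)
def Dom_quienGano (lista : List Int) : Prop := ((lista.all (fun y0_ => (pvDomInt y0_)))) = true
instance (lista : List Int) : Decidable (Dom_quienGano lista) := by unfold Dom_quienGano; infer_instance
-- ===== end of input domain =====

-- B replaces A's filter/sort/compare-first-two pipeline by a single pass keeping a
-- running (index, distance) minimum with a tie flag; same return value everywhere.

-- ===== PORT A =====
def quienGano (lista : List Int) : Option Int :=
  let l0 := PySem.List.enumerate lista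
  let l := l0.filter (fun x => decide (x.2 ≤ 21))
  if l.length = 0 then none
  else if l.length = 1 then some (PySem.List.pyGetD l 0 (0, 0)).1
  else
    let distancias := l.map (fun p => (p.1, 21 - p.2))
    let s : List (Int × Int) := PySem.List.sorted distancias (fun x => x.2) false
    if (PySem.List.pyGetD s 0 (0, 0)).2 = (PySem.List.pyGetD s 1 (0, 0)).2 then none
    else some (PySem.List.pyGetD s 0 (0, 0)).1

-- ===== PORT B =====
def quienGano_alt (lista : List Int) : Option Int :=
  let st := (PySem.List.enumerate lista).foldl
    (fun st p =>
      if p.2 ≤ 21 then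
        let d := 21 - p.2
        match st.1 with
        | none => (some (p.1, d), false)
        | some m =>
          if d < m.2 then (some (p.1, d), false)
          else if d = m.2 then (some m, true)
          else st
      else st)
    ((none : Option (Int × Int)), false)
  match st with
  | (none, _) => none
  | (some m, tied) => if tied then none else some m.1

-- ===== PRECONDITION & SPEC =====
def Spec_quienGano (lista : List Int) (out : Option Int) : Prop := out = quienGano_alt lista
instance (lista : List Int) (out : Option Int) : Decidable (Spec_quienGano lista out) := by unfold Spec_quienGano; infer_instance

-- ===== CLAIM (what is proved, stated in full; the proofs are below) =====
def Claim_equal_quienGano : Prop := ∀ (lista : List Int), Dom_quienGano lista → Spec_quienGano lista (quienGano lista)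

-- ===== LEMMAS AND PROOFS =====

-- B's loop body on a candidate pair (index, distance); proof-side helper
def pvStep (st : Option (Int × Int) × Bool) (q : Int × Int) : Option (Int × Int) × Bool :=
  match st.1 with
  | none => (some q, false)
  | some m =>
    if q.2 < m.2 then (some q, false)
    else if q.2 = m.2 then (some m, true)
    else st

-- the candidate list: (index, distance-to-21) of the players that did not bust
def pvDs (lista : List Int) : List (Int × Int) :=
  ((PySem.List.enumerate lista).filter (fun x => decide (x.2 ≤ 21))).map (fun p => (p.1, 21 - p.2))

lemma pv_alt_eq (lista : List Int) :
    quienGano_alt lista =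
      match (pvDs lista).foldl pvStep (none, false) with
      | (none, _) => none
      | (some m, tied) => if tied then none else some m.1 := by
  unfold quienGano_alt pvDs
  have hbody : (fun (st : Option (Int × Int) × Bool) (p : Int × Int) =>
      if p.2 ≤ 21 then
        let d := 21 - p.2
        match st.1 with
        | none => (some (p.1, d), false)
        | some m =>
          if d < m.2 then (some (p.1, d), false)
          else if d = m.2 then (some m, true)
          else st
      else st)
      = fun st p => if p.2 ≤ 21 then pvStep st (p.1, 21 - p.2) else st := by
    funext st p
    rcases st with ⟨_ | m, t⟩ <;> simp [pvStep]
  rw [hbody, PySem.List.foldl_ite_eq_foldl_filter, List.foldl_map]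

lemma pv_two_le_countP {α : Type} (p : α → Bool) (l : List α) (a b : α)
    (ha : a ∈ l) (hb : b ∈ l) (hab : a ≠ b) (hpa : p a = true) (hpb : p b = true) :
    2 ≤ l.countP p := by
  have ha' : a ∈ l.filter p := List.mem_filter.2 ⟨ha, hpa⟩
  have hb' : b ∈ l.filter p := List.mem_filter.2 ⟨hb, hpb⟩
  rw [List.countP_eq_length_filter]
  rcases hl : l.filter p with _ | ⟨x, _ | ⟨y, t⟩⟩
  · simp [hl] at ha'
  · rw [hl] at ha' hb'; simp at ha' hb'; exact absurd (ha'.trans hb'.symm) hab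
  · simp

lemma pvInv (ds : List (Int × Int)) :
    (ds = [] ∧ ds.foldl pvStep (none, false) = (none, false)) ∨
    ∃ m, ds.foldl pvStep (none, false)
          = (some m, decide (2 ≤ ds.countP (fun y => decide (y.2 = m.2))))
        ∧ m ∈ ds ∧ ∀ y ∈ ds, m.2 ≤ y.2 := by
  induction ds using List.reverseRecOn with
  | nil => left; exact ⟨rfl, rfl⟩
  | append_singleton ds y ih =>
    right
    rw [List.foldl_append, List.foldl_cons, List.foldl_nil]
    rcases ih with ⟨hnil, hst⟩ | ⟨m, hst, hmem, hmin⟩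
    · subst hnil
      refine ⟨y, ?_, by simp, by simp⟩
      rw [hst]
      simp [pvStep]
    · rw [hst]
      by_cases hlt : y.2 < m.2
      · refine ⟨y, ?_, by simp, ?_⟩
        · have hz : ds.countP (fun z => decide (z.2 = y.2)) = 0 := by
            rw [List.countP_eq_zero]
            intro z hzmem
            have hmz := hmin z hzmem
            simp only [decide_eq_true_eq]
            omega
          have hcount : (ds ++ [y]).countP (fun z => decide (z.2 = y.2)) = 1 := by
            rw [List.countP_append, hz]; simp
          have hdec : decide (2 ≤ (ds ++ [y]).countP (fun z => decide (z.2 = y.2))) = false := by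
            rw [hcount]
            decide
          rw [hdec]
          simp [pvStep, hlt]
        · intro z hzmem
          rcases List.mem_append.1 hzmem with h | h
          · exact le_trans (le_of_lt hlt) (hmin z h)
          · simp at h; subst h; exact le_refl _
      · by_cases heq : y.2 = m.2
        · refine ⟨m, ?_, List.mem_append_left _ hmem, ?_⟩
          · have h1 : 0 < ds.countP (fun z => decide (z.2 = m.2)) :=
              List.countP_pos_iff.2 ⟨m, hmem, by simp⟩
            have hy1 : List.countP (fun z => decide (z.2 = m.2)) [y] = 1 := by simp [heq]
            have hdec : decide (2 ≤ (ds ++ [y]).countP (fun z => decide (z.2 = m.2))) = true := by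
              rw [List.countP_append, hy1]
              exact decide_eq_true (by omega)
            rw [hdec]
            simp [pvStep, heq]
          · intro z hzmem
            rcases List.mem_append.1 hzmem with h | h
            · exact hmin z h
            · simp at h; subst h; omega
        · refine ⟨m, ?_, List.mem_append_left _ hmem, ?_⟩
          · have hy0 : List.countP (fun z => decide (z.2 = m.2)) [y] = 0 := by simp [heq]
            have hcnt : (ds ++ [y]).countP (fun z => decide (z.2 = m.2))
                = ds.countP (fun z => decide (z.2 = m.2)) := by
              rw [List.countP_append, hy0]
              omega
            rw [hcnt]
            simp [pvStep, hlt, heq]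
          · intro z hzmem
            rcases List.mem_append.1 hzmem with h | h
            · exact hmin z h
            · simp at h; subst h; omega

-- ===== VERDICT (by name: the statement is the Claim_ definition above) =====
theorem quienGano_spec : Claim_equal_quienGano := by
  intro lista _dom
  unfold Spec_quienGano
  rw [pv_alt_eq]
  simp only [quienGano, pvDs]
  rcases hcc : (PySem.List.enumerate lista).filter (fun x => decide (x.2 ≤ 21))
    with _ | ⟨p, _ | ⟨q, rest⟩⟩
  · rw [hcc]
    simp
  · rw [hcc]
    simp [pysem, pvStep]
  · rw [hcc]
    set ds : List (Int × Int) := (p :: q :: rest).map (fun p => (p.1, 21 - p.2)) with hds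
    have hdslen : 2 ≤ ds.length := by rw [hds]; simp
    simp only [List.length_cons]
    have h0 : ¬ (rest.length + 1 + 1 = 0) := by omega
    have h1 : ¬ (rest.length + 1 + 1 = 1) := by omega
    rw [if_neg h0, if_neg h1]
    set s : List (Int × Int) := PySem.List.sorted ((p :: q :: rest).map (fun p => (p.1, 21 - p.2))) (fun x => x.2) false with hs
    have hslen : 2 ≤ s.length := by rw [hs, PySem.List.length_sorted]; exact hdslen
    rcases hss : s with _ | ⟨m0, _ | ⟨m1, t⟩⟩
    · rw [hss] at hslen; simp at hslen
    · rw [hss] at hslen; simp at hslen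
    · have hsorted : PySem.List.sorted ds (fun x => x.2) false = m0 :: m1 :: t := by
        rw [hds, ← hs, hss]
      have hm0min : ∀ y ∈ ds, m0.2 ≤ y.2 := fun y hy =>
        PySem.List.key_head_sorted_le (xs := ds) (key := fun x => x.2) hsorted y hy
      have hm0mem : m0 ∈ ds := by
        have : m0 ∈ PySem.List.sorted ds (fun x => x.2) false := by rw [hsorted]; simp
        exact (PySem.List.mem_sorted _ _ _ _).1 this
      have hm1mem : m1 ∈ ds := by
        have : m1 ∈ PySem.List.sorted ds (fun x => x.2) false := by rw [hsorted]; simp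
        exact (PySem.List.mem_sorted _ _ _ _).1 this
      have hperm : (m0 :: m1 :: t).Perm ds := by
        rw [← hsorted]; exact PySem.List.sorted_perm _ _ _
      have hpair : (m0 :: m1 :: t).Pairwise (fun a b => a.2 ≤ b.2) := by
        rw [← hsorted]
        exact PySem.List.sorted_pairwise (xs := ds) (key := fun x => x.2)
      rcases pvInv ds with ⟨hnil, _⟩ | ⟨m, hst, hmmem, hmmin⟩
      · rw [hnil] at hdslen; simp at hdslen
      · rw [hst]
        have hkeq : m.2 = m0.2 := le_antisymm (hmmin m0 hm0mem) (hm0min m hmmem)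
        have hcnt_perm : (m0 :: m1 :: t).countP (fun y => decide (y.2 = m.2))
            = ds.countP (fun y => decide (y.2 = m.2)) := hperm.countP_eq _
        by_cases h2 : 2 ≤ ds.countP (fun y => decide (y.2 = m.2))
        · have hm1eq : m1.2 = m0.2 := by
            by_contra hne
            have hltq : m0.2 < m1.2 := by
              have := hm0min m1 hm1mem; omega
            have ht0 : t.countP (fun y => decide (y.2 = m0.2)) = 0 := by
              rw [List.countP_eq_zero]
              intro z hz
              have hle : m1.2 ≤ z.2 := (List.pairwise_cons.1 (List.pairwise_cons.1 hpair).2).1 z hz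
              simp only [decide_eq_true_eq]
              omega
            have hle1 : (m0 :: m1 :: t).countP (fun y => decide (y.2 = m.2)) ≤ 1 := by
              simp only [List.countP_cons, hkeq]
              rw [ht0]
              simp [hne]
            rw [hcnt_perm] at hle1
            omega
          have hdec : decide (2 ≤ ds.countP (fun y => decide (y.2 = m.2))) = true := by simp [h2]
          simp [pysem, hdec, hm1eq]
        · have h1c : 0 < ds.countP (fun y => decide (y.2 = m.2)) :=
            List.countP_pos_iff.2 ⟨m, hmmem, by simp⟩
          have hcnt1 : ds.countP (fun y => decide (y.2 = m.2)) = 1 := by omega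
          have hm0m : m0 = m := by
            by_contra hne
            have := pv_two_le_countP (fun y => decide (y.2 = m.2)) ds m0 m hm0mem hmmem hne
              (by simp [hkeq]) (by simp)
            omega
          have hm1ne : ¬ m1.2 = m0.2 := by
            intro hcontra
            have : 2 ≤ (m0 :: m1 :: t).countP (fun y => decide (y.2 = m.2)) := by
              rw [List.countP_cons, List.countP_cons]
              have p0 : (decide (m0.2 = m.2)) = true := by simp [hkeq]
              have p1 : (decide (m1.2 = m.2)) = true := by simp [hcontra, hkeq]
              rw [p0, p1]
              simp
            rw [hcnt_perm] at this
            omega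
          have hdec : decide (2 ≤ ds.countP (fun y => decide (y.2 = m.2))) = false := by
            simp; omega
          have hm1ne' : ¬ m.2 = m1.2 := by
            rw [← hm0m]; exact fun h => hm1ne h.symm
          simp [pysem, hdec, hm1ne', hm0m]
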